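-- pv_equiv track=rewrite | github.com/jqm-das/backtracking | sudokup2red.py | createOptions
-- ===== SOURCE A (Python) =====
-- def createOptions(height):
--     options = []
--     if height < 10:
--         for i in range (1,height+1):
--             options.append(str(i))
--     else:
--         letters = ["A","B","C","D","E","F","G"]
--         for i in range (1,10):
--             options.append(str(i))
--         for j in range (10,height+1):
--             options.append(letters[j-10])
--     return options
-- ===== SOURCE B (Python) =====
-- def createOptions(height):
--     symbols = "123456789ABCDEFG"
--     options = []
--     for i in range(1, height + 1):
--         options.append(symbols[i - 1])
--     return options
-- ===== Notes on version B (the rewrite author's own statement) =====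
-- stated objective: simpler
-- what changed: Replaces the height<10 branch with two separate digit and letter loops by one uniform loop over a single combined symbol table, indexing symbols[i-1].
import Mathlib
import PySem

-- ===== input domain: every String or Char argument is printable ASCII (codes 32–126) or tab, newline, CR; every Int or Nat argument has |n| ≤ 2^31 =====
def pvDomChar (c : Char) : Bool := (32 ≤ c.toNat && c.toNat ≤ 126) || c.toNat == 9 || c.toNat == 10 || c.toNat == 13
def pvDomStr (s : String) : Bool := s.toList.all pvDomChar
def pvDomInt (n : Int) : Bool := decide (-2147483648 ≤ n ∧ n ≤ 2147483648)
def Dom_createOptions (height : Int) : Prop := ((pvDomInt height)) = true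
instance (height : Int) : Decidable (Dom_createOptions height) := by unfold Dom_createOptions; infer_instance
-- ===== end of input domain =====

-- B replaces A's height<10 branch and separate digit/letter loops with one loop over a single
-- combined symbol table (objective: simpler).

-- ===== PORT A =====
def createOptions (height : Int) : List String :=
  if height < 10 then
    (PySem.List.pyRange 1 (height + 1) 1).foldl (fun acc i => acc ++ [PySem.Int.toStr i]) []
  else
    let letters : List String := ["A", "B", "C", "D", "E", "F", "G"]
    let options := (PySem.List.pyRange 1 10 1).foldl (fun acc i => acc ++ [PySem.Int.toStr i]) []
    -- letters[j-10]: IndexError (none) is outside Pre_; .getD "" is never reached under Pre_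
    (PySem.List.pyRange 10 (height + 1) 1).foldl
      (fun acc j => acc ++ [(PySem.List.pyGet? letters (j - 10)).getD ""]) options

-- ===== PORT B =====
def createOptions_alt (height : Int) : List String :=
  let symbols : String := "123456789ABCDEFG"
  -- symbols[i-1]: IndexError (none) is outside Pre_; .getD "" is never reached under Pre_
  (PySem.List.pyRange 1 (height + 1) 1).foldl
    (fun acc i => acc ++ [((PySem.Str.pyGet? symbols (i - 1)).map Char.toString).getD ""]) []

-- ===== PRECONDITION & SPEC =====
-- Pre_ excludes height ≥ 17, where the Python A raises IndexError (letters[j-10] out of range);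
-- B raises IndexError there too.
def Pre_createOptions (height : Int) : Prop := height ≤ 16
instance (height : Int) : Decidable (Pre_createOptions height) := by unfold Pre_createOptions; infer_instance
def pvWitness_createOptions : Int := 12

def Spec_createOptions (height : Int) (out : List String) : Prop := out = createOptions_alt height
instance (height : Int) (out : List String) : Decidable (Spec_createOptions height out) := by unfold Spec_createOptions; infer_instance

-- ===== CLAIM (what is proved, stated in full; the proofs are below) =====
def Claim_equal_createOptions : Prop := ∀ (height : Int), Dom_createOptions height → Pre_createOptions height → Spec_createOptions height (createOptions height)

-- ===== LEMMAS AND PROOFS =====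
theorem createOptions_nonpos (height : Int) (h : height ≤ 0) :
    createOptions height = [] ∧ createOptions_alt height = [] := by
  have hnil : PySem.List.pyRange 1 (height + 1) 1 = [] :=
    PySem.List.pyRange_one_eq_nil (by omega)
  constructor
  · simp [createOptions, hnil, show height < 10 by omega]
  · simp [createOptions_alt, hnil]

-- ===== VERDICT (by name: the statement is the Claim_ definition above) =====
theorem createOptions_spec : Claim_equal_createOptions := by
  intro height _ hpre
  unfold Spec_createOptions
  by_cases h0 : height ≤ 0
  · have := createOptions_nonpos height h0
    rw [this.1, this.2]
  · have h1 : 1 ≤ height := by omega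
    have h16 : height ≤ 16 := hpre
    interval_cases height <;> decide
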